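-- pv_equiv track=rewrite | github.com/sotuamax/cnv_Turticae | scaffold/gff_parse.py | consecutive_start
-- ===== SOURCE A (Python) =====
-- def consecutive_start(l):
--     """Function for consecutive order (less than 5 difference)"""
--     sl = sorted(l)
--     ll = len(l)
--     sl_list = list()
--     for i in range(ll-1):
--         if sl[i+1] - sl[i] < 5:
--             sl_list.append(sl[i+1])
--             sl_list.append(sl[i])
--     sl_list = sorted(set(sl_list))
--     return sl_list
-- ===== SOURCE B (Python) =====
-- def consecutive_start(l):
--     """Hash-based: count occurrences, then keep each distinct value that is
--     duplicated or for which one of the 8 possible nearby values (distance 1..4)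
--     is present; no adjacency scan of a sorted list."""
--     cnt = {}
--     for x in l:
--         cnt[x] = cnt.get(x, 0) + 1
--     kept = [x for x in cnt
--             if cnt[x] > 1 or any(x + d in cnt for d in (-4, -3, -2, -1, 1, 2, 3, 4))]
--     return sorted(kept)
-- ===== Notes on version B (the rewrite author's own statement) =====
-- stated objective: alternative
-- what changed: A sorts the list and scans adjacent pairs of the sorted list, appending both endpoints of every pair with gap<5 and finally sorting the deduplicated collection; B never scans sorted neighbours: it builds a hash count map in one pass and keeps a distinct value iff it is duplicated or one of the 8 possible values at distance 1..4 is a key, then sorts only the kept values.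
import Mathlib
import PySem

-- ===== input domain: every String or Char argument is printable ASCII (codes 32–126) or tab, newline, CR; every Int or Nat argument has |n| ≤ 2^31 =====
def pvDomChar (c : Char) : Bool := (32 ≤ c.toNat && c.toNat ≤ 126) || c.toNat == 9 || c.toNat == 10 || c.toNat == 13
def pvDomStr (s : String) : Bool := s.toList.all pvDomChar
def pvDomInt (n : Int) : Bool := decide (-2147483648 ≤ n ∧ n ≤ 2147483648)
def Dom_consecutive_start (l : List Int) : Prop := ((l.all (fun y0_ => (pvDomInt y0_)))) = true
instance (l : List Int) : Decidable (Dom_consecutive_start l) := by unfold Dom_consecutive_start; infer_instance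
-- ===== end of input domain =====

-- B replaces A's sorted-adjacency scan by hash-map probing: count occurrences in a dict,
-- keep a distinct value iff it is duplicated or a value at distance 1..4 is a key (objective: alternative).

-- ===== PORT A =====
def consecutive_start (l : List Int) : List Int :=
  let sl := PySem.List.sorted l (fun x => x) false
  let ll : Int := l.length
  let sl_list : List Int := (PySem.List.pyRange 0 (ll - 1) 1).foldl
    (fun acc i =>
      if PySem.List.pyGetD sl (i + 1) 0 - PySem.List.pyGetD sl i 0 < 5 then
        (acc ++ [PySem.List.pyGetD sl (i + 1) 0]) ++ [PySem.List.pyGetD sl i 0]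
      else acc) []
  PySem.List.sorted (PySem.Set.ofList sl_list) (fun x => x) false

-- ===== PORT B =====
def consecutive_start_alt (l : List Int) : List Int :=
  let cnt : PySem.Dict Int Int :=
    l.foldl (fun d x => d.insert x (d.getD x 0 + 1)) PySem.Dict.empty
  -- `cnt[x]` for x iterated over cnt's keys = cnt.getD x 0 (exact: x is a key)
  let kept : List Int := (PySem.Dict.keys cnt).filter (fun x =>
    decide (1 < cnt.getD x 0) ||
    ([-4, -3, -2, -1, 1, 2, 3, 4] : List Int).any (fun d => cnt.contains (x + d)))
  PySem.List.sorted kept (fun x => x) false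

-- ===== PRECONDITION & SPEC =====
def Spec_consecutive_start (l : List Int) (out : List Int) : Prop := out = consecutive_start_alt l
instance (l : List Int) (out : List Int) : Decidable (Spec_consecutive_start l out) := by unfold Spec_consecutive_start; infer_instance

-- ===== CLAIM (what is proved, stated in full; the proofs are below) =====
def Claim_equal_consecutive_start : Prop := ∀ (l : List Int), Dom_consecutive_start l → Spec_consecutive_start l (consecutive_start l)

-- ===== LEMMAS AND PROOFS =====

-- A's loop, flattened
theorem a_loop_eq_flatMap (L : List Int) (c : Int → Prop) [DecidablePred c]
    (f g : Int → Int) :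
    L.foldl (fun acc i => if c i then (acc ++ [f i]) ++ [g i] else acc) [] =
      L.flatMap (fun i => if c i then [f i, g i] else []) := by
  have h : L.foldl (fun acc i => if c i then (acc ++ [f i]) ++ [g i] else acc) [] =
      L.foldl (fun acc i => acc ++ (if c i then [f i, g i] else [])) [] := by
    apply PySem.List.foldl_congr_mem
    intro acc i _
    split_ifs <;> simp
  rw [h, PySem.List.foldl_append_eq_flatMap]
  simp

-- membership in A's collected pair list, in natural-index form
theorem mem_flat_pairs (s : List Int) (x : Int) :
    (x ∈ (PySem.List.pyRange 0 ((s.length : Int) - 1) 1).flatMap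
        (fun i => if PySem.List.pyGetD s (i + 1) 0 - PySem.List.pyGetD s i 0 < 5
                  then [PySem.List.pyGetD s (i + 1) 0, PySem.List.pyGetD s i 0] else []))
    ↔ ∃ (k : ℕ) (h : k + 1 < s.length), s[k + 1] - s[k] < 5 ∧ (x = s[k + 1] ∨ x = s[k]) := by
  simp only [List.mem_flatMap, PySem.List.mem_pyRange_one]
  constructor
  · rintro ⟨i, ⟨h0, hi⟩, hx⟩
    have hk1 : (i + 1).toNat = i.toNat + 1 := by omega
    have hkl : i.toNat + 1 < s.length := by omega
    have e0 : PySem.List.pyGetD s i 0 = s[i.toNat] :=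
      PySem.List.pyGetD_eq_getElem s 0 h0 (by omega)
    have e1 : PySem.List.pyGetD s (i + 1) 0 = s[i.toNat + 1] := by
      rw [PySem.List.pyGetD_eq_getElem s 0 (by omega) (by omega)]
      simp [hk1]
    rw [e0, e1] at hx
    split_ifs at hx with hc
    · simp only [List.mem_cons, List.not_mem_nil, or_false] at hx
      exact ⟨i.toNat, hkl, hc, hx⟩
    · simp at hx
  · rintro ⟨k, hk, hc, hx⟩
    refine ⟨(k : Int), ⟨by omega, by omega⟩, ?_⟩
    have e0 : PySem.List.pyGetD s (k : Int) 0 = s[k] :=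
      PySem.List.pyGetD_eq_getElem s 0 (by omega) (by omega)
    have e1 : PySem.List.pyGetD s ((k : Int) + 1) 0 = s[k + 1] := by
      rw [PySem.List.pyGetD_eq_getElem s 0 (by omega) (by omega)]
      congr 1
    rw [e0, e1, if_pos hc]
    simpa using hx

-- 2 ≤ count → two occurrences split
theorem two_le_count_split (s : List Int) (x : Int) (h : 2 ≤ s.count x) :
    ∃ u v w, s = u ++ x :: v ++ x :: w := by
  induction s with
  | nil => simp at h
  | cons a t ih =>
    by_cases hax : a = x
    · subst hax
      have ht : 1 ≤ t.count a := by simp at h ⊢; omega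
      have hmem : a ∈ t := List.count_pos_iff.mp (by omega)
      obtain ⟨v, w, rfl⟩ := List.append_of_mem hmem
      exact ⟨[], v, w, rfl⟩
    · have : 2 ≤ t.count x := by simp [hax] at h ⊢; omega
      obtain ⟨u, v, w, rfl⟩ := ih this
      exact ⟨a :: u, v, w, rfl⟩

-- in a sorted list, a duplicated value sits at two ADJACENT positions
theorem dup_adjacent (s : List Int) (hp : s.Pairwise (· ≤ ·)) (x : Int)
    (h : 2 ≤ s.count x) : ∃ u r, s = u ++ x :: x :: r := by
  obtain ⟨u, v, w, rfl⟩ := two_le_count_split s x h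
  cases v with
  | nil => exact ⟨u, w, by simp⟩
  | cons z v' =>
    have hsub : (x :: z :: (v' ++ x :: w)).Pairwise (· ≤ ·) := by
      refine hp.sublist ?_
      simp
    have h1 : x ≤ z := (List.pairwise_cons.mp hsub).1 z (by simp)
    have h2 : z ≤ x :=
      ((List.pairwise_cons.mp (List.pairwise_cons.mp hsub).2).1) x (by simp)
    have hzx : z = x := le_antisymm h2 h1
    exact ⟨u, v' ++ x :: w, by simp [hzx]⟩

-- the central characterisation: x is an endpoint of an adjacent sorted pair with gap < 5
-- iff x occurs twice or some other element lies within distance 4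
theorem pairs_iff_near (s : List Int) (hp : s.Pairwise (· ≤ ·)) (x : Int) :
    (∃ (k : ℕ) (h : k + 1 < s.length), s[k + 1] - s[k] < 5 ∧ (x = s[k + 1] ∨ x = s[k]))
    ↔ x ∈ s ∧ (2 ≤ s.count x ∨ ∃ y ∈ s, y ≠ x ∧ x - 5 < y ∧ y < x + 5) := by
  have mono : ∀ (i j : ℕ) (h1 : i < s.length) (h2 : j < s.length), i < j → s[i] ≤ s[j] := by
    intro i j h1 h2 hij
    exact List.pairwise_iff_getElem.mp hp i j h1 h2 hij
  constructor
  · rintro ⟨k, hk, hgap, hx⟩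
    have hle : s[k] ≤ s[k + 1] := mono k (k+1) (by omega) hk (by omega)
    by_cases heq : s[k] = s[k + 1]
    · -- duplicate: count ≥ 2
      have hxk : x = s[k] := by rcases hx with h | h <;> omega
      have hcount : 2 ≤ s.count x := by
        have hsplit : s = s.take k ++ s.drop k := (List.take_append_drop k s).symm
        have hd1 : s.drop k = s[k] :: s.drop (k+1) := List.drop_eq_getElem_cons (by omega)
        have hd2 : s.drop (k+1) = s[k+1] :: s.drop (k+2) := List.drop_eq_getElem_cons (by omega)
        calc 2 ≤ (s.take k ++ s.drop k).count x := by
                rw [List.count_append, hd1, hd2]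
                simp [hxk, ← heq]
                omega
             _ = s.count x := by rw [← hsplit]
      exact ⟨by rcases hx with h | h <;> (subst h; exact List.getElem_mem _), Or.inl hcount⟩
    · -- the other endpoint is a distinct nearby element
      rcases hx with h | h
      · exact ⟨h ▸ List.getElem_mem _, Or.inr ⟨s[k], List.getElem_mem _, by omega, by omega, by omega⟩⟩
      · exact ⟨h ▸ List.getElem_mem _, Or.inr ⟨s[k+1], List.getElem_mem _, by omega, by omega, by omega⟩⟩
  · rintro ⟨hmem, hcase⟩
    rcases hcase with hcount | ⟨y, hy, hyne, hy1, hy2⟩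
    · obtain ⟨u, r, hs⟩ := dup_adjacent s hp x hcount
      refine ⟨u.length, by rw [hs]; simp, ?_⟩
      have e0 : s[u.length]'(by rw [hs]; simp) = x := by
        rw [List.getElem_of_eq hs]
        rw [List.getElem_append_right (le_refl u.length)]
        simp
      have e1 : s[u.length + 1]'(by rw [hs]; simp) = x := by
        rw [List.getElem_of_eq hs]
        rw [List.getElem_append_right (by omega : u.length ≤ u.length + 1)]
        simp
      rw [e0, e1]
      exact ⟨by omega, Or.inl rfl⟩
    · obtain ⟨i, hi, hxi⟩ := List.getElem_of_mem hmem
      obtain ⟨j, hj, hyj⟩ := List.getElem_of_mem hy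
      by_cases hxy : x < y
      · -- y above x: the pair (i, i+1) is close
        have hij : i < j := by
          rcases Nat.lt_trichotomy i j with h | h | h
          · exact h
          · exfalso; subst h; omega
          · exfalso; have := mono j i hj hi h; omega
        have hk : i + 1 < s.length := by omega
        have h1 : s[i+1] ≤ s[j] := by
          rcases Nat.eq_or_lt_of_le (by omega : i + 1 ≤ j) with h | h
          · subst h; rfl
          · exact mono _ _ hk hj h
        exact ⟨i, hk, by omega, Or.inr hxi.symm⟩
      · -- y below x: the pair (i-1, i) is close
        have hyx : y < x := by omega
        have hji : j < i := by
          rcases Nat.lt_trichotomy j i with h | h | h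
          · exact h
          · exfalso; subst h; omega
          · exfalso; have := mono i j hi hj h; omega
        have hi1 : 1 ≤ i := by omega
        have h1 : s[j] ≤ s[i-1] := by
          rcases Nat.eq_or_lt_of_le (by omega : j ≤ i - 1) with h | h
          · subst h; rfl
          · exact mono _ _ hj (by omega) h
        refine ⟨i - 1, by omega, ?_, ?_⟩
        · rw [show s[i-1+1]'(by omega) = s[i]'hi from by congr 1; omega]
          omega
        · left
          rw [show s[i-1+1]'(by omega) = s[i]'hi from by congr 1; omega]
          omega

theorem consecutive_start_eq (l : List Int) :
    consecutive_start l = consecutive_start_alt l := by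
  unfold consecutive_start consecutive_start_alt
  rw [PySem.Dict.foldl_insert_getD_add_one_eq_counter]
  set s := PySem.List.sorted l (fun x => x) false with hs
  have hlen : s.length = l.length := by rw [hs]; exact PySem.List.length_sorted l _ _
  apply PySem.List.sorted_eq_sorted_of_perm _ _ _ (fun a b h => h)
  apply (List.perm_ext_iff_of_nodup (PySem.Set.nodup_ofList _)
    (List.Nodup.filter _ (PySem.Dict.nodup_keys_counter l))).mpr
  intro x
  rw [PySem.Set.mem_ofList, a_loop_eq_flatMap,
    show ((l.length : Int)) = ((s.length : Int)) by rw [hlen],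
    mem_flat_pairs,
    pairs_iff_near s (by rw [hs]; simpa using PySem.List.sorted_pairwise l (fun x => x)) x,
    List.mem_filter]
  have hcnt : s.count x = l.count x := List.Perm.count_eq (by rw [hs]; exact PySem.List.sorted_perm l _ _) x
  simp only [PySem.Dict.keys_counter, PySem.Set.mem_ofList, Bool.or_eq_true, decide_eq_true_eq,
    List.any_eq_true, PySem.Dict.getD_counter, PySem.Dict.contains_counter, List.contains_iff_mem,
    hcnt]
  constructor
  · rintro ⟨hmem, hc⟩
    refine ⟨by simpa [hs, PySem.List.mem_sorted] using hmem, ?_⟩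
    rcases hc with hcount | ⟨y, hy, hyne, hy1, hy2⟩
    · left; omega
    · right
      refine ⟨y - x, by simp; omega, ?_⟩
      have : x + (y - x) = y := by ring
      rw [this]
      simpa [hs, PySem.List.mem_sorted] using hy
  · rintro ⟨hmem, hc⟩
    refine ⟨by simpa [hs, PySem.List.mem_sorted] using hmem, ?_⟩
    rcases hc with hcount | ⟨d, hd, hdy⟩
    · left; omega
    · right
      have hdb : d ≠ 0 ∧ -4 ≤ d ∧ d ≤ 4 := by
        simp at hd
        rcases hd with h|h|h|h|h|h|h|h <;> subst h <;> norm_num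
      exact ⟨x + d, by simpa [hs, PySem.List.mem_sorted] using hdy, by omega, by omega, by omega⟩

-- ===== VERDICT (by name: the statement is the Claim_ definition above) =====
theorem consecutive_start_spec : Claim_equal_consecutive_start := by
  intro l _
  exact consecutive_start_eq l
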